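-- pv_equiv track=rewrite | github.com/michael-sobczak/Schedule1_Modding | decompile_tooling/script_dumper.py | count_braces
-- ===== SOURCE A (Python) =====
-- def count_braces(line: str) -> int:
--     """Net brace delta for a line, ignoring braces inside strings (best-effort)."""
--     # Very lightweight string skipping; good enough for ScriptDump style.
--     in_str = False
--     esc = False
--     delta = 0
--     for ch in line:
--         if in_str:
--             if esc:
--                 esc = False
--             elif ch == "\\":
--                 esc = True
--             elif ch == '"':
--                 in_str = False
--             continue
--         else:
--             if ch == '"':
--                 in_str = True
--                 continue
--             if ch == "{":
--                 delta += 1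
--             elif ch == "}":
--                 delta -= 1
--     return delta
-- ===== SOURCE B (Python) =====
-- import re
--
-- _STRING_RE = re.compile(r'"(?:\\[\s\S]|[^"\\])*"?')
--
-- def count_braces(line: str) -> int:
--     """Net brace delta for a line, ignoring braces inside strings (best-effort)."""
--     body = _STRING_RE.sub('', line)
--     return body.count('{') - body.count('}')
-- ===== Notes on version B (the rewrite author's own statement) =====
-- stated objective: faster
-- what changed: Replaces the per-character boolean state machine with a strip-then-count decomposition: one regex substitution deletes every string literal (handling escapes and an unterminated quote), then the net delta is the count of opening braces minus the count of closing braces.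
import Mathlib
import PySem

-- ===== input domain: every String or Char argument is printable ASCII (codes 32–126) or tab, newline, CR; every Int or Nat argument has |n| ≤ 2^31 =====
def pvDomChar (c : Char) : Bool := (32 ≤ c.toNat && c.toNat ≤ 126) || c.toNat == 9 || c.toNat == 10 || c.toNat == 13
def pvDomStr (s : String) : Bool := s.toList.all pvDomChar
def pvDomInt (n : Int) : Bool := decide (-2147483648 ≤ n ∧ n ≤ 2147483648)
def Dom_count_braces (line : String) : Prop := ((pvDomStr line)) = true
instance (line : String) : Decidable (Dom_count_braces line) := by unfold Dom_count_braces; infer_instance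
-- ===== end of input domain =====

-- B replaces A's per-character boolean state machine by strip-string-literals-then-count; same value, simpler decomposition.

-- ===== PORT A =====
-- A's loop body as a step function over the state (in_str, esc, delta), in A's branch order.
def cbStep (s : Bool × Bool × Int) (ch : Char) : Bool × Bool × Int :=
  let (in_str, esc, delta) := s
  if in_str then
    if esc then (in_str, false, delta)
    else if ch = '\\' then (in_str, true, delta)
    else if ch = '"' then (false, esc, delta)
    else (in_str, esc, delta)
  else
    if ch = '"' then (true, esc, delta)
    else if ch = '{' then (in_str, esc, delta + 1)
    else if ch = '}' then (in_str, esc, delta - 1)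
    else (in_str, esc, delta)

def count_braces (line : String) : Int :=
  (line.toList.foldl cbStep (false, false, 0)).2.2

-- ===== PORT B =====
-- Hand port of re.sub(r'"(?:\\[\s\S]|[^"\\])*"?', '', line): re.sub scans left to right;
-- at an opening quote the greedy body consumes escaped pairs '\\'+any and non-quote,
-- non-backslash chars, then the optional closing quote.  cbEat consumes exactly that
-- matched region after the opening quote and returns the unmatched remainder (exact:
-- a lone trailing backslash matches neither alternative nor '"?', so it is left over).
def cbEat : List Char → List Char
  | [] => []
  | c :: rest =>
    if c = '\\' then
      match rest with
      | [] => [c]                 -- trailing backslash: match ends before it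
      | _ :: rest' => cbEat rest' -- '\\[\s\S]' consumes two chars
    else if c = '"' then rest     -- the optional closing quote ends the match
    else cbEat rest               -- '[^"\\]'

lemma cbEat_length_le : ∀ l : List Char, (cbEat l).length ≤ l.length
  | [] => by simp [cbEat]
  | c :: rest => by
    unfold cbEat
    split_ifs with h1 h2
    · match rest with
      | [] => simp
      | x :: rest' =>
        have := cbEat_length_le rest'
        simp; omega
    · simp
    · have := cbEat_length_le rest
      simp; omega

-- the substitution: drop each string literal, keep everything else
def cbStrip : List Char → List Char
  | [] => []
  | c :: rest =>
    if c = '"' then cbStrip (cbEat rest)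
    else c :: cbStrip rest
termination_by l => l.length
decreasing_by
  · have := cbEat_length_le rest; simp; omega
  · simp

def count_braces_alt (line : String) : Int :=
  let body := cbStrip line.toList
  (body.count '{' : Int) - (body.count '}' : Int)

-- ===== PRECONDITION & SPEC =====
def Spec_count_braces (line : String) (out : Int) : Prop := out = count_braces_alt line
instance (line : String) (out : Int) : Decidable (Spec_count_braces line out) := by unfold Spec_count_braces; infer_instance

-- ===== CLAIM (what is proved, stated in full; the proofs are below) =====
def Claim_equal_count_braces : Prop := ∀ (line : String), Dom_count_braces line → Spec_count_braces line (count_braces line)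

-- ===== LEMMAS AND PROOFS =====
def cbBal (l : List Char) : Int := (l.count '{' : Int) - (l.count '}' : Int)

lemma cbBal_cons (c : Char) (l : List Char) :
    cbBal (c :: l) = ((if c = '{' then 1 else 0) - (if c = '}' then 1 else 0)) + cbBal l := by
  simp [cbBal, List.count_cons]
  split_ifs with h1 h2 <;> simp_all <;> ring

lemma cbStep_out (d : Int) (c : Char) :
    cbStep (false, false, d) c =
      if c = '"' then (true, false, d)
      else if c = '{' then (false, false, d + 1)
      else if c = '}' then (false, false, d - 1)
      else (false, false, d) := by
  simp [cbStep]

lemma cbStep_in (d : Int) (c : Char) :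
    cbStep (true, false, d) c =
      if c = '\\' then (true, true, d)
      else if c = '"' then (false, false, d)
      else (true, false, d) := by
  simp [cbStep]

lemma cbStep_esc (d : Int) (c : Char) : cbStep (true, true, d) c = (true, false, d) := by
  simp [cbStep]

lemma cbEat_quote (rest : List Char) : cbEat ('"' :: rest) = rest := by
  rw [cbEat.eq_def]; simp

lemma cbEat_bs_nil : cbEat ['\\'] = ['\\'] := by
  rw [cbEat.eq_def]; simp

lemma cbEat_bs_cons (c' : Char) (rest' : List Char) :
    cbEat ('\\' :: c' :: rest') = cbEat rest' := by
  rw [cbEat.eq_def]; simp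

lemma cbEat_other (c : Char) (rest : List Char) (hb : ¬c = '\\') (hq : ¬c = '"') :
    cbEat (c :: rest) = cbEat rest := by
  rw [cbEat.eq_def]; simp [hb, hq]

lemma cb_key : ∀ (n : Nat) (l : List Char), l.length ≤ n → ∀ d : Int,
    ((l.foldl cbStep (false, false, d)).2.2 = d + cbBal (cbStrip l))
    ∧ ((l.foldl cbStep (true, false, d)).2.2 = d + cbBal (cbStrip (cbEat l))) := by
  intro n
  induction n with
  | zero =>
    intro l hl d
    have : l = [] := List.length_eq_zero_iff.mp (Nat.le_zero.mp hl)
    subst this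
    simp [cbStrip, cbEat, cbBal]
  | succ n ih =>
    intro l hl d
    match l with
    | [] => simp [cbStrip, cbEat, cbBal]
    | c :: rest =>
      have hr : rest.length ≤ n := by simpa using hl
      constructor
      · -- outside a string
        by_cases hq : c = '"'
        · subst hq
          rw [List.foldl_cons, cbStep_out, if_pos rfl]
          simpa [cbStrip] using (ih rest hr d).2
        · by_cases ho : c = '{'
          · subst ho
            rw [List.foldl_cons, cbStep_out, if_neg (by decide), if_pos rfl]
            rw [(ih rest hr (d + 1)).1, cbStrip, if_neg (by decide), cbBal_cons,
              if_pos rfl, if_neg (by decide)]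
            ring
          · by_cases hc : c = '}'
            · subst hc
              rw [List.foldl_cons, cbStep_out, if_neg (by decide), if_neg (by decide),
                if_pos rfl]
              rw [(ih rest hr (d - 1)).1, cbStrip, if_neg (by decide), cbBal_cons,
                if_neg (by decide), if_pos rfl]
              ring
            · rw [List.foldl_cons, cbStep_out, if_neg hq, if_neg ho, if_neg hc]
              rw [(ih rest hr d).1, cbStrip, if_neg hq, cbBal_cons, if_neg ho, if_neg hc]
              ring
      · -- inside a string, esc = false
        by_cases hb : c = '\\'
        · subst hb
          rw [List.foldl_cons, cbStep_in, if_pos rfl]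
          match rest with
          | [] => simp [cbEat_bs_nil, cbStrip, cbBal]
          | c' :: rest' =>
            have hr' : rest'.length ≤ n := by simp at hl; omega
            rw [List.foldl_cons, cbStep_esc, (ih rest' hr' d).2, cbEat_bs_cons]
        · by_cases hq : c = '"'
          · subst hq
            rw [List.foldl_cons, cbStep_in, if_neg (by decide), if_pos rfl]
            rw [(ih rest hr d).1, cbEat_quote]
          · rw [List.foldl_cons, cbStep_in, if_neg hb, if_neg hq]
            rw [(ih rest hr d).2, cbEat_other c rest hb hq]

-- ===== VERDICT (by name: the statement is the Claim_ definition above) =====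
theorem count_braces_spec : Claim_equal_count_braces := by
  intro line _
  unfold Spec_count_braces count_braces count_braces_alt
  have := (cb_key line.toList.length line.toList le_rfl 0).1
  simpa [cbBal] using this
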